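-- pv_equiv track=rewrite | github.com/nci/FourCastNeXt | notebook/.ipynb_checkpoints/data_loader-checkpoint.py | channel_to_var
-- ===== SOURCE A (Python) =====
-- def get_vars():
--   sfc_vars = {'10u':0, '10v':1, '2t':2, 'sp':3, 'msl':4, 'tcwv':19}
--   pl_vars = {
--     't': ([850, 500], [5, 15, ]),
--     'u': ([1000, 850, 500, ], [6, 9, 12, ]),
--     'v': ([1000, 850, 500, ], [7, 10, 13, ]),
--     'z': ([1000, 850, 500, 50], [8, 11, 14, 16, ]),
--     'r': ([850, 500], [18, 17, ]),
--   }
--   return sfc_vars, pl_vars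
--
-- def channel_to_var(channel_idx):
--   sfc_vars, pl_vars = get_vars()
--
--   for v, cdx in sfc_vars.items():
--     if cdx == channel_idx:
--       return v
--
--   for v, info in pl_vars.items():
--     levels, channels = info
--     for idx, lvl in enumerate(levels):
--       if channels[idx] == channel_idx:
--         return f'{v}{lvl}'
-- ===== SOURCE B (Python) =====
-- def get_vars():
--   sfc_vars = {'10u':0, '10v':1, '2t':2, 'sp':3, 'msl':4, 'tcwv':19}
--   pl_vars = {
--     't': ([850, 500], [5, 15, ]),
--     'u': ([1000, 850, 500, ], [6, 9, 12, ]),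
--     'v': ([1000, 850, 500, ], [7, 10, 13, ]),
--     'z': ([1000, 850, 500, 50], [8, 11, 14, 16, ]),
--     'r': ([850, 500], [18, 17, ]),
--   }
--   return sfc_vars, pl_vars
--
-- def channel_to_var(channel_idx):
--   sfc_vars, pl_vars = get_vars()
--   reverse = {cdx: v for v, cdx in sfc_vars.items()}
--   for v, (levels, channels) in pl_vars.items():
--     for lvl, cdx in zip(levels, channels):
--       reverse[cdx] = f'{v}{lvl}'
--   return reverse.get(channel_idx)
-- ===== Notes on version B (the rewrite author's own statement) =====
-- stated objective: simpler
-- what changed: Replaces A's two nested early-return scans (with enumerate and repeated channels[idx] indexing) by building one reverse channel->name dict once and returning a single .get lookup, which also returns None on a miss.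
import Mathlib
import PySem

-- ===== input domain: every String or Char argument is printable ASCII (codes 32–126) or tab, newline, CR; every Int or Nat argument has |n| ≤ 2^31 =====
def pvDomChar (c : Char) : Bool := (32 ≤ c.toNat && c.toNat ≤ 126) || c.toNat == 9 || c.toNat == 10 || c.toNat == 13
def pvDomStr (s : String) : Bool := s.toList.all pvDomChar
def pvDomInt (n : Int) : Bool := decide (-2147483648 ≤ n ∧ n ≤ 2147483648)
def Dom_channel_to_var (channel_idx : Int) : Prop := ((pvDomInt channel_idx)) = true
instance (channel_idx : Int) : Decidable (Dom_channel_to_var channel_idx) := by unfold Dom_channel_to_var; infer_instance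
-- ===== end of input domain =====

-- B replaces A's two nested early-return scans by building one reverse table (channel → name) once and doing a single lookup; objective: simpler.

-- ===== PORT A =====
-- get_vars(): the two literal dicts, as insertion-ordered association lists
def pvGetVars : List (String × Int) × List (String × (List Int × List Int)) :=
  ([("10u", 0), ("10v", 1), ("2t", 2), ("sp", 3), ("msl", 4), ("tcwv", 19)],
   [("t", ([850, 500], [5, 15])),
    ("u", ([1000, 850, 500], [6, 9, 12])),
    ("v", ([1000, 850, 500], [7, 10, 13])),
    ("z", ([1000, 850, 500, 50], [8, 11, 14, 16])),
    ("r", ([850, 500], [18, 17]))])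

-- first loop: for v, cdx in sfc_vars.items(): if cdx == channel_idx: return v
def pvScanSfc (channel_idx : Int) : List (String × Int) → Option String
  | [] => none
  | (v, cdx) :: rest => if cdx = channel_idx then some v else pvScanSfc channel_idx rest

-- inner loop: for idx, lvl in enumerate(levels): if channels[idx] == channel_idx: return f'{v}{lvl}'
-- channels[idx] via pyGetD: for the literal data of get_vars the index is always in range, so this is exact
def pvScanLevels (channel_idx : Int) (v : String) (channels : List Int) : List (Int × Int) → Option String
  | [] => none
  | (idx, lvl) :: rest =>
      if PySem.List.pyGetD channels idx 0 = channel_idx then some (v ++ PySem.Int.toStr lvl)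
      else pvScanLevels channel_idx v channels rest

-- second loop: for v, info in pl_vars.items(): …
def pvScanPl (channel_idx : Int) : List (String × (List Int × List Int)) → Option String
  | [] => none
  | (v, info) :: rest =>
      match pvScanLevels channel_idx v info.2 (PySem.List.enumerate info.1 0) with
      | some r => some r
      | none => pvScanPl channel_idx rest

def channel_to_var (channel_idx : Int) : Option String :=
  match pvScanSfc channel_idx pvGetVars.1 with
  | some r => some r
  | none => pvScanPl channel_idx pvGetVars.2

-- ===== PORT B =====
-- reverse = {cdx: v for v, cdx in sfc_vars.items()}, then reverse[cdx] = f'{v}{lvl}' over zip(levels, channels)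
def pvReverse : PySem.Dict Int String :=
  let rev := pvGetVars.1.foldl (fun d (p : String × Int) => d.insert p.2 p.1) PySem.Dict.empty
  pvGetVars.2.foldl
    (fun d p => (List.zip p.2.1 p.2.2).foldl (fun d q => d.insert q.2 (p.1 ++ PySem.Int.toStr q.1)) d)
    rev

def channel_to_var_alt (channel_idx : Int) : Option String :=
  pvReverse.get? channel_idx

-- ===== PRECONDITION & SPEC =====
def Spec_channel_to_var (channel_idx : Int) (out : Option String) : Prop := out = channel_to_var_alt channel_idx
instance (channel_idx : Int) (out : Option String) : Decidable (Spec_channel_to_var channel_idx out) := by unfold Spec_channel_to_var; infer_instance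

-- ===== CLAIM (what is proved, stated in full; the proofs are below) =====
def Claim_equal_channel_to_var : Prop := ∀ (channel_idx : Int), Dom_channel_to_var channel_idx → Spec_channel_to_var channel_idx (channel_to_var channel_idx)

-- ===== LEMMAS AND PROOFS =====
theorem channel_to_var_out_of_range (n : Int) (h : n < 0 ∨ 19 < n) : channel_to_var n = none := by
  norm_num [channel_to_var, pvGetVars, pvScanSfc, pvScanPl, pvScanLevels, PySem.List.enumerate,
    PySem.List.pyGetD, Int.toNat]
  split_ifs <;> first | rfl | omega

theorem channel_to_var_alt_out_of_range (n : Int) (h : n < 0 ∨ 19 < n) : channel_to_var_alt n = none := by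
  norm_num [channel_to_var_alt, pvReverse, pvGetVars, PySem.Dict.insert, PySem.Dict.get?,
    PySem.Dict.empty, PySem.Dict.contains, PySem.Dict.items, List.zip]
  omega

-- ===== VERDICT (by name: the statement is the Claim_ definition above) =====
set_option maxHeartbeats 2000000 in
theorem channel_to_var_spec : Claim_equal_channel_to_var := by
  intro n _
  unfold Spec_channel_to_var
  by_cases h : 0 ≤ n ∧ n ≤ 19
  · obtain ⟨h1, h2⟩ := h
    interval_cases n <;>
      norm_num [channel_to_var, channel_to_var_alt, pvGetVars, pvScanSfc, pvScanPl, pvScanLevels,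
        PySem.List.enumerate, PySem.List.pyGetD, Int.toNat, pvReverse, PySem.Dict.insert,
        PySem.Dict.get?, PySem.Dict.empty, PySem.Dict.contains, PySem.Dict.items, List.zip]
  · rw [channel_to_var_out_of_range n (by omega), channel_to_var_alt_out_of_range n (by omega)]
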